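-- pv_equiv track=rewrite | github.com/flufiCo/PLAB | test_py/Test_1/answer_1.py | circular_path
-- ===== SOURCE A (Python) =====
-- def circular_path(n, m):
--     array = [i + 1 for i in range(n)]
--     path = []
--     current_index = 0
--
--     while True:
--         path.append(array[current_index])
--         current_index = (current_index + m) % n
--         if current_index == 0:
--             break
--
--     return ''.join(map(str, path))
-- ===== SOURCE B (Python) =====
-- def circular_path(n, m):
--     # cycle length: k*m % n first returns to 0 at k = n // gcd(n, m)
--     a, b = n, m % n
--     while b:
--         a, b = b, a % b
--     length = n // a
--     return ''.join(str(k * m % n + 1) for k in range(length))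
-- ===== Notes on version B (the rewrite author's own statement) =====
-- stated objective: faster
-- what changed: Replaces the simulate-until-the-index-returns-to-zero loop over a prebuilt n-element array with a closed-form cycle length n // gcd(n, m) followed by direct generation of the L = n//gcd(n,m) values (k*m % n + 1), removing the array and the cycle-detection test.
import Mathlib
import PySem

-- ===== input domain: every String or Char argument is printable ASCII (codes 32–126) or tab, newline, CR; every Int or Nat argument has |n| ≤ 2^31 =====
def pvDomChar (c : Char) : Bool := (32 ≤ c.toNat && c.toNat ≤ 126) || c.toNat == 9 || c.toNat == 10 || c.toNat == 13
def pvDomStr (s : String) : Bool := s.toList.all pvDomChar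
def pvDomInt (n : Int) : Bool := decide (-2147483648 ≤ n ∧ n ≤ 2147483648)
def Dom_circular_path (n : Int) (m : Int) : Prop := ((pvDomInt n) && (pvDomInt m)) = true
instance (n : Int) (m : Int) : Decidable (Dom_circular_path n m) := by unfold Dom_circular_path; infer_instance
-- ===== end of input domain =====

-- B replaces A's simulate-until-index-returns loop with the closed-form cycle length n // gcd(n, m)
-- and direct generation of the values; equivalence is proved on n ≥ 1 (A raises IndexError for n ≤ 0).

-- ===== PORT A =====
-- the while-loop of A; fuel n.toNat is enough since the cycle closes after at most n appends
def circular_path_loop (array : List Int) (n : Int) (m : Int) :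
    Nat → Int → List Int → List Int
  | 0, _, path => path
  | fuel+1, ci, path =>
    match PySem.List.pyGet? array ci with
    | none => path  -- IndexError in Python; unreachable under Pre_
    | some v =>
      let path' := path ++ [v]
      let ci' := PySem.Int.mod (ci + m) n
      if ci' = 0 then path' else circular_path_loop array n m fuel ci' path'

def circular_path (n : Int) (m : Int) : String :=
  let array := (PySem.List.pyRange 0 n 1).map (fun i => i + 1)
  PySem.Str.join "" ((circular_path_loop array n m n.toNat 0 []).map PySem.Int.toStr)

-- ===== PORT B =====
-- Source B's hand-written Euclid loop (while b: a, b = b, a % b); fuel bounds its iterations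
def circular_path_gcd (fuel : Nat) (a : Int) (b : Int) : Int :=
  match fuel with
  | 0 => a
  | fuel+1 => if b = 0 then a else circular_path_gcd fuel b (PySem.Int.mod a b)

def circular_path_alt (n : Int) (m : Int) : String :=
  let b0 := PySem.Int.mod m n
  let g := circular_path_gcd (b0.natAbs + 1) n b0
  let length := PySem.Int.floordiv n g
  PySem.Str.join ""
    ((PySem.List.pyRange 0 length 1).map (fun k => PySem.Int.toStr (PySem.Int.mod (k * m) n + 1)))

-- ===== PRECONDITION & SPEC =====
-- Pre_ excludes n ≤ 0, on which A raises (IndexError on the empty array, A returns no value there)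
def Pre_circular_path (n : Int) (m : Int) : Prop := 1 ≤ n
instance (n : Int) (m : Int) : Decidable (Pre_circular_path n m) := by
  unfold Pre_circular_path; infer_instance
def pvWitness_circular_path : Int × Int := (6, 4)

def Spec_circular_path (n : Int) (m : Int) (out : String) : Prop := out = circular_path_alt n m
instance (n : Int) (m : Int) (out : String) : Decidable (Spec_circular_path n m out) := by
  unfold Spec_circular_path; infer_instance

-- ===== CLAIM (what is proved, stated in full; the proofs are below) =====
def Claim_equal_circular_path : Prop := ∀ (n : Int) (m : Int), Dom_circular_path n m → Pre_circular_path n m → Spec_circular_path n m (circular_path n m)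

-- ===== LEMMAS AND PROOFS =====

theorem cp_dvd_iff (N M k : Nat) (hN : 0 < N) :
    N ∣ k * M ↔ (N / Nat.gcd N M) ∣ k := by
  have hgpos : 0 < Nat.gcd N M := Nat.gcd_pos_of_pos_left M hN
  have hco : Nat.Coprime (N / Nat.gcd N M) (M / Nat.gcd N M) :=
    Nat.coprime_div_gcd_div_gcd hgpos
  have haN : Nat.gcd N M * (N / Nat.gcd N M) = N := Nat.mul_div_cancel' (Nat.gcd_dvd_left N M)
  have haM : Nat.gcd N M * (M / Nat.gcd N M) = M := Nat.mul_div_cancel' (Nat.gcd_dvd_right N M)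
  generalize hA : N / Nat.gcd N M = a at *
  generalize hB : M / Nat.gcd N M = b at *
  generalize hG : Nat.gcd N M = g at *
  constructor
  · intro h
    have h2 : g * a ∣ g * (k * b) := by
      rw [haN]
      have hkM : k * M = g * (k * b) := by rw [← haM]; ring
      rwa [hkM] at h
    have h3 : a ∣ k * b := (Nat.mul_dvd_mul_iff_left hgpos).mp h2
    exact hco.dvd_of_dvd_mul_right h3
  · rintro ⟨t, rfl⟩
    exact ⟨t * b, by rw [← haN, ← haM]; ring⟩

theorem cp_dvd_iff_int (n m : Int) (hn : 1 ≤ n) (k : Nat) :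
    n ∣ (k : Int) * m ↔ (n.toNat / Int.gcd n m) ∣ k := by
  have hN : n = (n.toNat : Int) := (Int.toNat_of_nonneg (by omega)).symm
  have hgcd : Int.gcd n m = Nat.gcd n.toNat m.natAbs := by
    unfold Int.gcd; congr 1; omega
  rw [hgcd, ← cp_dvd_iff n.toNat m.natAbs k (by omega)]
  rw [hN, Int.natCast_dvd, Int.natAbs_mul, Int.natAbs_natCast, Int.toNat_natCast]

-- Euclid loop computes Int.gcd (positive first argument, 0 ≤ b < a, enough fuel)
theorem cp_gcd_loop (f : Nat) : ∀ (a b : Int), 0 < a → 0 ≤ b → b < a → b.toNat < f →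
    circular_path_gcd f a b = (Int.gcd a b : Int) := by
  induction f with
  | zero => intro a b _ _ _ h; omega
  | succ f ih =>
    intro a b ha hb hba hf
    unfold circular_path_gcd
    by_cases h0 : b = 0
    · rw [h0, Int.gcd_zero_right, Int.natAbs_of_nonneg (le_of_lt ha)]
      simp
    · simp [h0]
      have hbpos : 0 < b := by omega
      have hmod : PySem.Int.mod a b = a % b := PySem.Int.mod_eq_emod_of_pos hbpos
      have h1 : 0 ≤ a % b := Int.emod_nonneg a (by omega)
      have h2 : a % b < b := Int.emod_lt_of_pos a hbpos
      rw [hmod, ih b (a % b) hbpos h1 h2 (by omega)]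
      congr 1
      rw [Int.gcd_comm b (a % b), Int.gcd_emod, Int.gcd_comm]

theorem cp_array_get (n ci : Int) (h0 : 0 ≤ ci) (h1 : ci < n) :
    PySem.List.pyGet? ((PySem.List.pyRange 0 n 1).map (fun i => i + 1)) ci = some (ci + 1) := by
  rw [PySem.List.pyGet?_of_nonneg _ h0]
  have hn : n = ((n.toNat : Nat) : Int) := by omega
  rw [hn, PySem.List.getElem?_map_pyRange_zero _ _ _ (by omega)]
  congr 1
  omega

theorem cp_loop (n m : Int) (hn : 1 ≤ n) (f : Nat) :
    ∀ (k : Nat) (acc : List Int), k < n.toNat / Int.gcd n m → n.toNat / Int.gcd n m ≤ k + f →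
    circular_path_loop ((PySem.List.pyRange 0 n 1).map (fun i => i + 1)) n m f
        (PySem.Int.mod ((k : Int) * m) n) acc
      = acc ++ (List.range (n.toNat / Int.gcd n m - k)).map
          (fun j => PySem.Int.mod (((k + j : Nat) : Int) * m) n + 1) := by
  induction f with
  | zero => intro k acc hk hf; omega
  | succ f ih =>
    intro k acc hk hf
    have hnpos : (0:Int) < n := by omega
    have hci0 : 0 ≤ PySem.Int.mod ((k : Int) * m) n := PySem.Int.mod_nonneg _ hnpos
    have hci1 : PySem.Int.mod ((k : Int) * m) n < n := PySem.Int.mod_lt _ hnpos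
    unfold circular_path_loop
    rw [cp_array_get n _ hci0 hci1]
    simp only
    have hmod : ∀ a : Int, PySem.Int.mod a n = a % n := fun a => PySem.Int.mod_eq_emod_of_pos hnpos
    have hstep : PySem.Int.mod (PySem.Int.mod ((k : Int) * m) n + m) n
        = PySem.Int.mod (((k+1 : Nat) : Int) * m) n := by
      rw [hmod, hmod, hmod, Int.emod_add_emod]
      congr 1
      push_cast
      ring
    rw [hstep]
    by_cases hz : PySem.Int.mod (((k+1 : Nat) : Int) * m) n = 0
    · rw [if_pos hz]
      have hdvd : n ∣ ((k+1 : Nat) : Int) * m := by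
        rw [hmod] at hz
        exact Int.dvd_of_emod_eq_zero hz
      have hL : (n.toNat / Int.gcd n m) ∣ (k+1) := (cp_dvd_iff_int n m hn (k+1)).mp hdvd
      have hkL : k + 1 = n.toNat / Int.gcd n m := by
        rcases hL with ⟨t, ht⟩
        rcases Nat.eq_zero_or_pos t with rfl | h
        · omega
        · have h1 : n.toNat / Int.gcd n m ≤ (n.toNat / Int.gcd n m) * t :=
            Nat.le_mul_of_pos_right _ h
          omega
      rw [← hkL]
      simp
    · rw [if_neg hz]
      have hkk : k + 1 < n.toNat / Int.gcd n m := by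
        rcases Nat.lt_or_ge (k+1) (n.toNat / Int.gcd n m) with h | h
        · exact h
        · exfalso
          have hkeq : k + 1 = n.toNat / Int.gcd n m := by omega
          have : n ∣ ((k+1 : Nat) : Int) * m := (cp_dvd_iff_int n m hn (k+1)).mpr (hkeq ▸ dvd_refl _)
          rw [hmod] at hz
          exact hz (Int.emod_eq_zero_of_dvd this)
      rw [ih (k+1) _ hkk (by omega)]
      rw [List.append_assoc]
      congr 1
      have hrange : n.toNat / Int.gcd n m - k = (n.toNat / Int.gcd n m - (k+1)) + 1 := by omega
      rw [hrange, List.range_succ_eq_map, List.map_cons, List.map_map, List.singleton_append]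
      congr 1
      apply List.map_congr_left
      intro j hj
      have harg : ((k:Int) + 1 + (j:Int)) * m = ((k:Int) + ((j:Int) + 1)) * m := by ring
      simp only [Function.comp_apply, Nat.succ_eq_add_one]
      push_cast
      rw [harg]

-- ===== VERDICT (by name: the statement is the Claim_ definition above) =====
theorem circular_path_spec : Claim_equal_circular_path := by
  intro n m _ hpre
  unfold Pre_circular_path at hpre
  unfold Spec_circular_path
  have hnpos : (0:Int) < n := by omega
  have hgpos : 0 < Int.gcd n m := by
    have : Int.gcd n m = Nat.gcd n.toNat m.natAbs := by unfold Int.gcd; congr 1; omega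
    rw [this]
    exact Nat.gcd_pos_of_pos_left _ (by omega)
  have hL1 : 1 ≤ n.toNat / Int.gcd n m :=
    (Nat.one_le_div_iff hgpos).mpr (Nat.le_of_dvd (by omega)
      (by
        have : Int.gcd n m = Nat.gcd n.toNat m.natAbs := by unfold Int.gcd; congr 1; omega
        rw [this]; exact Nat.gcd_dvd_left _ _))
  -- A side
  have hA : circular_path n m
      = PySem.Str.join "" (((List.range (n.toNat / Int.gcd n m)).map
          (fun j => PySem.Int.mod (((0 + j : Nat) : Int) * m) n + 1)).map PySem.Int.toStr) := by
    have h0 : (0 : Int) = PySem.Int.mod (((0:Nat) : Int) * m) n := by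
      rw [PySem.Int.mod_eq_emod_of_pos hnpos]
      simp
    have hloop := cp_loop n m hpre n.toNat 0 [] (by omega) (by
      have := Nat.div_le_self n.toNat (Int.gcd n m); omega)
    rw [← h0] at hloop
    unfold circular_path
    dsimp only
    rw [hloop]
    simp
  -- B side
  have hB : circular_path_alt n m
      = PySem.Str.join "" ((List.range (n.toNat / Int.gcd n m)).map
          ((fun k => PySem.Int.toStr (PySem.Int.mod (k * m) n + 1)) ∘ (fun k : Nat => (k : Int)))) := by
    unfold circular_path_alt
    dsimp only
    have hb0 : 0 ≤ PySem.Int.mod m n := PySem.Int.mod_nonneg _ hnpos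
    have hb1 : PySem.Int.mod m n < n := PySem.Int.mod_lt _ hnpos
    rw [cp_gcd_loop _ n _ hnpos hb0 hb1 (by omega)]
    have hg : Int.gcd n (PySem.Int.mod m n) = Int.gcd n m := by
      rw [PySem.Int.mod_eq_emod_of_pos hnpos, Int.gcd_comm n (m % n), Int.gcd_emod, Int.gcd_comm]
    rw [hg]
    have hfd : PySem.Int.floordiv n (Int.gcd n m : Int) = ((n.toNat / Int.gcd n m : Nat) : Int) := by
      rw [PySem.Int.floordiv_eq_ediv_of_pos (by exact_mod_cast hgpos)]
      have hn : n = ((n.toNat : Nat) : Int) := by omega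
      rw [hn]
      norm_cast
    rw [hfd, PySem.List.pyRange_zero_natCast, List.map_map]
  rw [hA, hB, List.map_map]
  congr 1
  apply List.map_congr_left
  intro j hj
  simp [Function.comp]
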